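-- pv_equiv track=rewrite | github.com/trangium/Python | AI/crossword4.py | goodness
-- ===== SOURCE A (Python) =====
-- BLOCKCHAR = "#"
--
-- def goodness(row):
--     count = 0
--     counts = set()
--     for cell in row:
--         if cell == BLOCKCHAR:
--             if count: counts.add(count)
--             count = 0
--         else:
--             count += 1
--     counts.add(count)
--     good = 0
--     for n in counts:
--         if n <= 6: good += [0, 0, 0, 5, 3, 0, -9][n]
--         else: good -= 6*(n-5)**2
--     return good
-- ===== SOURCE B (Python) =====
-- BLOCKCHAR = "#"
--
-- def goodness(row):
--     lengths = {len(seg) for seg in row.split(BLOCKCHAR)}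
--     return sum([0, 0, 0, 5, 3, 0, -9][n] if n <= 6 else -6 * (n - 5) ** 2
--                for n in lengths)
-- ===== Notes on version B (the rewrite author's own statement) =====
-- stated objective: idiomatic
-- what changed: Replaces the manual per-character run counter with conditional set insertion by splitting the row on the block character, taking the set of segment lengths and scoring that set with one sum (zero-length segments are harmless because a zero-length run scores zero).
import Mathlib
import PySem

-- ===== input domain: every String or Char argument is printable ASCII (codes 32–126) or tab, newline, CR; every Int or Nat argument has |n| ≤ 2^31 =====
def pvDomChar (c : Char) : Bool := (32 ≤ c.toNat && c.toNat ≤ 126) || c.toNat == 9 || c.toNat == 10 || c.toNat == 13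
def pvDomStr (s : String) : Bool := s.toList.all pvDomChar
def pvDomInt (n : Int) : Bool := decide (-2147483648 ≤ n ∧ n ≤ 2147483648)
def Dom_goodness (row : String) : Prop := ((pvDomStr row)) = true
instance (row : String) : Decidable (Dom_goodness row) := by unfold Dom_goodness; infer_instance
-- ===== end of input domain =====

-- B replaces A's manual run-length counter loop by a split-on-block set comprehension of run lengths (idiomatic; measured faster by a constant factor).

-- ===== PORT A =====
-- one step of A's for-loop over the row's cells; state = (count, counts)
def goodnessStep (st : Int × PySem.Set Int) (cell : Char) : Int × PySem.Set Int :=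
  if cell = '#' then (0, if st.1 ≠ 0 then st.2.add st.1 else st.2)
  else (st.1 + 1, st.2)

def goodness (row : String) : Int :=
  let st := row.toList.foldl goodnessStep (0, PySem.Set.empty)
  let counts := st.2.add st.1
  -- in the n ≤ 6 branch n is a run length with 0 ≤ n ≤ 6, so the index is always in range
  counts.foldl (fun good n =>
    if n ≤ 6 then good + (PySem.List.pyGet? ([0, 0, 0, 5, 3, 0, -9] : List Int) n).getD 0
    else good - 6 * (n - 5) ^ 2) 0

-- ===== PORT B =====
def goodness_alt (row : String) : Int :=
  -- row.split('#'): the separator is nonempty, so split? never returns none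
  let lengths : PySem.Set Int :=
    PySem.Set.ofList (((PySem.Str.split? row "#").getD []).map (fun seg => (PySem.Str.len seg : Int)))
  lengths.foldl (fun acc n =>
    acc + (if n ≤ 6 then (PySem.List.pyGet? ([0, 0, 0, 5, 3, 0, -9] : List Int) n).getD 0
           else -6 * (n - 5) ^ 2)) 0

-- ===== PRECONDITION & SPEC =====
def Spec_goodness (row : String) (out : Int) : Prop := out = goodness_alt row
instance (row : String) (out : Int) : Decidable (Spec_goodness row out) := by unfold Spec_goodness; infer_instance

-- ===== CLAIM (what is proved, stated in full; the proofs are below) =====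
def Claim_equal_goodness : Prop := ∀ (row : String), Dom_goodness row → Spec_goodness row (goodness row)

-- ===== LEMMAS AND PROOFS =====

-- recursive characterisation of Python's split on the single character '#'
def pySplitHash : List Char → List (List Char)
  | [] => [[]]
  | c :: cs =>
    if c = '#' then [] :: pySplitHash cs
    else match pySplitHash cs with
      | [] => [[c]]          -- unreachable: pySplitHash never returns []
      | h :: t => (c :: h) :: t

theorem pySplitHash_ne_nil (l : List Char) : pySplitHash l ≠ [] := by
  cases l with
  | nil => simp [pySplitHash]
  | cons c cs =>
    simp only [pySplitHash]
    split
    · simp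
    · split <;> simp

theorem go_hash : ∀ (fuel : Nat) (l cur : List Char) (acc : List (List Char)), l.length ≤ fuel →
    PySem.Chars.splitOn.go ['#'] fuel l cur acc =
      acc.reverse ++ (match pySplitHash l with
        | [] => [cur.reverse]
        | h :: t => (cur.reverse ++ h) :: t) := by
  intro fuel
  induction fuel with
  | zero =>
    intro l cur acc hl
    have : l = [] := List.eq_nil_of_length_eq_zero (Nat.le_zero.mp hl)
    subst this
    simp [PySem.Chars.splitOn.go, pySplitHash]
  | succ n ih =>
    intro l cur acc hl
    cases l with
    | nil => simp [PySem.Chars.splitOn.go, pySplitHash]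
    | cons c rest =>
      rw [PySem.Chars.splitOn.go]
      simp only [List.length_cons, Nat.succ_le_succ_iff] at hl
      by_cases hc : c = '#'
      · subst hc
        have hp : List.isPrefixOf ['#'] ('#' :: rest) = true := by
          simp [List.isPrefixOf]
        rw [if_pos hp]
        rw [show List.drop (List.length ['#']) ('#' :: rest) = rest by simp]
        rw [ih rest [] (cur.reverse :: acc) hl]
        simp only [pySplitHash]
        cases h : pySplitHash rest with
        | nil => exact absurd h (pySplitHash_ne_nil rest)
        | cons hh tt => simp
      · have hp : List.isPrefixOf ['#'] (c :: rest) = false := by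
          simp [List.isPrefixOf]; exact fun h => hc h.symm
        rw [if_neg (by simp [hp])]
        rw [ih rest (c :: cur) acc hl]
        simp only [pySplitHash, if_neg hc]
        cases h : pySplitHash rest with
        | nil => exact absurd h (pySplitHash_ne_nil rest)
        | cons hh tt => simp

theorem splitOn_hash (s : List Char) : PySem.Chars.splitOn s ['#'] = pySplitHash s := by
  rw [PySem.Chars.splitOn, go_hash (s.length + 1) s [] [] (by omega)]
  cases h : pySplitHash s with
  | nil => exact absurd h (pySplitHash_ne_nil s)
  | cons hh tt => simp

-- run lengths of cs given that the current run already has length `count`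
def lensFrom (count : Int) : List Char → List Int
  | [] => [count]
  | c :: cs => if c = '#' then count :: lensFrom 0 cs else lensFrom (count + 1) cs

theorem lensFrom_ne_nil (count : Int) (cs : List Char) : lensFrom count cs ≠ [] := by
  induction cs generalizing count with
  | nil => simp [lensFrom]
  | cons c cs ih => simp only [lensFrom]; split; · simp
                    · exact ih _

def addAll (S : PySem.Set Int) (xs : List Int) : PySem.Set Int := xs.foldl PySem.Set.add S

theorem foldl_goodnessStep (cs : List Char) : ∀ (count : Int) (S : PySem.Set Int),
    cs.foldl goodnessStep (count, S) =
      ((lensFrom count cs).getLastD 0,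
        addAll S (((lensFrom count cs).dropLast).filter (fun x => x ≠ 0))) := by
  induction cs with
  | nil => intro count S; simp [lensFrom, addAll]
  | cons c cs ih =>
    intro count S
    by_cases hc : c = '#'
    · subst hc
      rw [List.foldl_cons, show goodnessStep (count, S) '#' = (0, if count ≠ 0 then S.add count else S) by simp [goodnessStep]]
      rw [ih 0 _]
      simp only [lensFrom, if_true]
      have hne := lensFrom_ne_nil 0 cs
      rw [Prod.mk.injEq]
      refine ⟨?_, ?_⟩
      · rw [List.getLastD_cons]
        cases h : lensFrom 0 cs with
        | nil => exact absurd h hne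
        | cons a t => simp [List.getLastD]
      · rw [show (count :: lensFrom 0 cs).dropLast = count :: (lensFrom 0 cs).dropLast by
          cases h : lensFrom 0 cs with
          | nil => exact absurd h hne
          | cons a t => simp]
        by_cases h0 : count = 0
        · simp [h0, addAll]
        · simp [h0, addAll]
    · rw [List.foldl_cons, show goodnessStep (count, S) c = (count + 1, S) by simp [goodnessStep, hc]]
      rw [ih (count + 1) S]
      simp [lensFrom, hc]

def lensOf (s : List Char) : List Int := (pySplitHash s).map (fun seg => (seg.length : Int))

theorem lensFrom_eq (cs : List Char) : ∀ count : Int, lensFrom count cs =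
    match lensOf cs with
    | [] => [count]
    | h :: t => (count + h) :: t := by
  induction cs with
  | nil => intro count; simp [lensFrom, lensOf, pySplitHash]
  | cons c cs ih =>
    intro count
    by_cases hc : c = '#'
    · subst hc
      simp only [lensFrom, if_true, ih 0, lensOf, pySplitHash, List.map_cons]
      cases h : pySplitHash cs with
      | nil => exact absurd h (pySplitHash_ne_nil cs)
      | cons a t => simp
    · simp only [lensFrom, if_neg hc, ih (count + 1), lensOf, pySplitHash]
      cases h : pySplitHash cs with
      | nil => exact absurd h (pySplitHash_ne_nil cs)
      | cons a t => simp; ring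

theorem mem_addAll (xs : List Int) : ∀ (S : PySem.Set Int) (y : Int),
    y ∈ addAll S xs ↔ y ∈ S ∨ y ∈ xs := by
  induction xs with
  | nil => intro S y; simp [addAll]
  | cons x xs ih =>
    intro S y
    simp only [addAll, List.foldl_cons]
    rw [show List.foldl PySem.Set.add (S.add x) xs = addAll (S.add x) xs from rfl, ih]
    rw [PySem.Set.mem_add]
    simp [or_assoc, or_comm, or_left_comm]

theorem nodup_add (S : PySem.Set Int) (x : Int) (h : S.Nodup) : (S.add x).Nodup := by
  unfold PySem.Set.add
  split
  · exact h
  · rename_i hc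
    have : x ∉ S := by
      intro hm
      exact hc (by simpa [List.contains_iff_mem] using hm)
    simp [List.nodup_append, h]
    intro a ha hax
    rw [hax] at ha
    exact this ha

theorem nodup_addAll (xs : List Int) : ∀ (S : PySem.Set Int), S.Nodup → (addAll S xs).Nodup := by
  induction xs with
  | nil => intro S h; exact h
  | cons x xs ih => intro S h; exact ih _ (nodup_add S x h)

def score (n : Int) : Int :=
  if n ≤ 6 then (PySem.List.pyGet? ([0, 0, 0, 5, 3, 0, -9] : List Int) n).getD 0
  else -6 * (n - 5) ^ 2

theorem foldlA_score (l : List Int) : ∀ g : Int,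
    l.foldl (fun good n =>
      if n ≤ 6 then good + (PySem.List.pyGet? ([0, 0, 0, 5, 3, 0, -9] : List Int) n).getD 0
      else good - 6 * (n - 5) ^ 2) g = g + (l.map score).sum := by
  induction l with
  | nil => simp
  | cons x l ih =>
    intro g
    simp only [List.foldl_cons, List.map_cons, List.sum_cons, ih]
    unfold score
    split <;> ring

theorem foldlB_score (l : List Int) : ∀ g : Int,
    l.foldl (fun acc n =>
      acc + (if n ≤ 6 then (PySem.List.pyGet? ([0, 0, 0, 5, 3, 0, -9] : List Int) n).getD 0
             else -6 * (n - 5) ^ 2)) g = g + (l.map score).sum := by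
  induction l with
  | nil => simp
  | cons x l ih =>
    intro g
    simp only [List.foldl_cons, List.map_cons, List.sum_cons, ih]
    unfold score
    split <;> ring

theorem score_zero : score 0 = 0 := by decide

theorem sum_score_nodup (l : List Int) (h : l.Nodup) :
    (l.map score).sum = ∑ x ∈ l.toFinset, score x := by
  rw [List.sum_toFinset _ h]

theorem lensOf_ne_nil (s : List Char) : lensOf s ≠ [] := by
  unfold lensOf
  simp [pySplitHash_ne_nil s]

theorem lensFrom_zero (cs : List Char) : lensFrom 0 cs = lensOf cs := by
  rw [lensFrom_eq]
  cases h : lensOf cs with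
  | nil => exact absurd h (lensOf_ne_nil cs)
  | cons a t => simp

theorem dropLast_getLastD : ∀ (L : List Int), L ≠ [] → L.dropLast ++ [L.getLastD 0] = L
  | [x], _ => by simp
  | x :: y :: t, _ => by
    have := dropLast_getLastD (y :: t) (by simp)
    simpa using this

theorem splitB_lengths (row : String) :
    ((PySem.Str.split? row "#").getD []).map (fun seg => (PySem.Str.len seg : Int)) = lensOf row.toList := by
  rw [PySem.Str.split?]
  rw [show ("#" : String).toList = ['#'] from rfl]
  rw [PySem.Chars.split?, if_neg (by simp)]
  simp only [Option.map_some, Option.getD_some, List.map_map]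
  rw [splitOn_hash]
  simp [lensOf, PySem.Str.len, Function.comp]

theorem goodnessAB (row : String) : goodness row = goodness_alt row := by
  unfold goodness goodness_alt
  rw [foldl_goodnessStep, lensFrom_zero, splitB_lengths]
  set L := lensOf row.toList with hL
  have hLne : L ≠ [] := lensOf_ne_nil row.toList
  rw [foldlA_score, foldlB_score]
  set SA : PySem.Set Int := (addAll PySem.Set.empty (L.dropLast.filter (fun x => decide (x ≠ 0)))).add (L.getLastD 0) with hSA
  set SB : PySem.Set Int := PySem.Set.ofList L with hSB
  have hmemA : ∀ y : Int, y ∈ SA ↔ (y ∈ L.dropLast ∧ y ≠ 0) ∨ y = L.getLastD 0 := by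
    intro y
    rw [hSA, PySem.Set.mem_add, mem_addAll]
    simp [PySem.Set.empty, List.mem_filter]
  have hmemB : ∀ y : Int, y ∈ SB ↔ y ∈ L := fun y => PySem.Set.mem_ofList L y
  have hnA : SA.Nodup := nodup_add _ _ (nodup_addAll _ _ (by simp [PySem.Set.empty]))
  have hnB : SB.Nodup := PySem.Set.nodup_ofList L
  rw [zero_add, zero_add, sum_score_nodup SA hnA, sum_score_nodup SB hnB]
  have herase : SA.toFinset.erase 0 = SB.toFinset.erase 0 := by
    ext x
    simp only [Finset.mem_erase, List.mem_toFinset, hmemA, hmemB]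
    constructor
    · rintro ⟨hx0, (⟨hd, _⟩ | hlast)⟩
      · exact ⟨hx0, List.mem_of_mem_dropLast hd⟩
      · refine ⟨hx0, ?_⟩
        rw [← dropLast_getLastD L hLne]
        simp [hlast]
    · rintro ⟨hx0, hxL⟩
      refine ⟨hx0, ?_⟩
      rw [← dropLast_getLastD L hLne] at hxL
      rcases List.mem_append.mp hxL with hd | hs
      · exact Or.inl ⟨hd, hx0⟩
      · exact Or.inr (by simpa using hs)
  calc ∑ x ∈ SA.toFinset, score x
      = ∑ x ∈ SA.toFinset.erase 0, score x := (Finset.sum_erase _ score_zero).symm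
    _ = ∑ x ∈ SB.toFinset.erase 0, score x := by rw [herase]
    _ = ∑ x ∈ SB.toFinset, score x := Finset.sum_erase _ score_zero

-- ===== VERDICT (by name: the statement is the Claim_ definition above) =====
theorem goodness_spec : Claim_equal_goodness := by
  intro row _
  unfold Spec_goodness
  exact goodnessAB row
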